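-- pv_equiv track=rewrite | github.com/Lobarr/interview-practice | problems/wateringCans.py | wateringCans
-- ===== SOURCE A (Python) =====
-- from queue import Queue
--
-- class Can:
--   def __init__(self, capacity):
--     self.capacity = capacity
--
--   def getCapacity(self):
--     return self.capacity
--
--   def setCapacity(self, capacity):
--     self.capacity = capacity
--
-- def wateringCans(plants, capacity):
--   refills = 0
--   myCan = Can(capacity)
--   friendCan = Can(capacity)
--   nextCanQueue = Queue()
--   nextCanQueue.put(myCan)
--   nextCanQueue.put(friendCan)
--
--   while len(plants) > 0:
--     nextCan = nextCanQueue.get()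
--     plant = None
--
--     if nextCan is myCan:
--       plant = plants[0]
--       plants.pop(0)
--       nextCanQueue.put(myCan)
--     else:
--       plant = plants[-1]
--       plants.pop(-1)
--       nextCanQueue.put(friendCan)
--
--     if nextCan.getCapacity() <= plant:
--       refills += 1
--       myCan.setCapacity(capacity)
--       friendCan.setCapacity(capacity)
--     nextCan.setCapacity(nextCan.getCapacity() - plant)
--
--   return refills
-- ===== SOURCE B (Python) =====
-- def wateringCans(plants, capacity):
--     # Two index pointers with scalar can capacities: one O(n) pass,
--     # no list mutation (A empties the caller's list; B does not).
--     refills = 0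
--     my = capacity
--     friend = capacity
--     i = 0
--     j = len(plants) - 1
--     my_turn = True
--     while i <= j:
--         if my_turn:
--             plant = plants[i]
--             i += 1
--             if my <= plant:
--                 refills += 1
--                 my = capacity
--                 friend = capacity
--             my -= plant
--         else:
--             plant = plants[j]
--             j -= 1
--             if friend <= plant:
--                 refills += 1
--                 my = capacity
--                 friend = capacity
--             friend -= plant
--         my_turn = not my_turn
--     return refills
-- ===== Notes on version B (the rewrite author's own statement) =====
-- stated objective: faster
-- what changed: Replaces the queue of Can objects and repeated plants.pop(0)/pop(-1) list mutation with two index pointers and two scalar capacities in a single linear pass that leaves the input list untouched.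
import Mathlib
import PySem

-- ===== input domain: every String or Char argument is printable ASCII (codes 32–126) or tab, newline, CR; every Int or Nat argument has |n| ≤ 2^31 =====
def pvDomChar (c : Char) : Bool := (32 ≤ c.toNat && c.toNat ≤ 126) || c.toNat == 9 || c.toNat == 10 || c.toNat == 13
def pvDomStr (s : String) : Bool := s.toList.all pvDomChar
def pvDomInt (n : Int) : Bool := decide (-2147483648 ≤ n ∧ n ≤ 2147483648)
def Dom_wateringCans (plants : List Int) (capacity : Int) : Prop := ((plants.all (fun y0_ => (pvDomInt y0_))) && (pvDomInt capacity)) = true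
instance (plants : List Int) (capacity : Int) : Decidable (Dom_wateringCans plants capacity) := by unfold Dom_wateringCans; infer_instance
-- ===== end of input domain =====

-- B replaces A's queue of Can objects and repeated pop(0)/pop(-1) with two index
-- pointers and scalar capacities in one linear pass (A mutates/empties the caller's
-- list; B does not — equivalence here is about the RETURN value only).

-- ===== PORT A =====
-- A's queue alternates strictly myCan, friendCan, myCan, …: ported as the Bool
-- myTurn; the two Can objects' mutable capacities are the accumulators myCap/frCap.
def wateringCansLoopA (capacity : Int) (plants : List Int) (myCap frCap : Int)
    (myTurn : Bool) (refills : Int) : Int :=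
  match plants with
  | [] => refills
  | p :: rest =>
    if myTurn then
      -- plant = plants[0]; plants.pop(0)
      let plant := p
      let refills' := if myCap ≤ plant then refills + 1 else refills
      let myCap' := if myCap ≤ plant then capacity else myCap
      let frCap' := if myCap ≤ plant then capacity else frCap
      wateringCansLoopA capacity rest (myCap' - plant) frCap' false refills'
    else
      -- plant = plants[-1]; plants.pop(-1)
      let plant := (p :: rest).getLast (by simp)
      let rest' := (p :: rest).dropLast
      let refills' := if frCap ≤ plant then refills + 1 else refills
      let myCap' := if frCap ≤ plant then capacity else myCap
      let frCap' := if frCap ≤ plant then capacity else frCap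
      wateringCansLoopA capacity rest' myCap' (frCap' - plant) true refills'
  termination_by plants.length
  decreasing_by
    · simp
    · simp [List.length_dropLast]

def wateringCans (plants : List Int) (capacity : Int) : Int :=
  wateringCansLoopA capacity plants capacity capacity true 0

-- ===== PORT B =====
-- indices i, j are Ints as in the Python; the loop invariant keeps them in range,
-- so plants[i] is ported as pyGetD … 0 (the default is never used).
def wateringCansLoopB (plants : List Int) (capacity : Int) (i j : Int)
    (my fr : Int) (myTurn : Bool) (refills : Int) : Int :=
  if i ≤ j then
    if myTurn then
      let plant := PySem.List.pyGetD plants i 0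
      let refills' := if my ≤ plant then refills + 1 else refills
      let my' := if my ≤ plant then capacity else my
      let fr' := if my ≤ plant then capacity else fr
      wateringCansLoopB plants capacity (i + 1) j (my' - plant) fr' false refills'
    else
      let plant := PySem.List.pyGetD plants j 0
      let refills' := if fr ≤ plant then refills + 1 else refills
      let my' := if fr ≤ plant then capacity else my
      let fr' := if fr ≤ plant then capacity else fr
      wateringCansLoopB plants capacity i (j - 1) my' (fr' - plant) true refills'
  else refills
  termination_by (j + 1 - i).toNat
  decreasing_by all_goals omega

def wateringCans_alt (plants : List Int) (capacity : Int) : Int :=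
  wateringCansLoopB plants capacity 0 ((plants.length : Int) - 1) capacity capacity true 0

-- ===== PRECONDITION & SPEC =====
def Spec_wateringCans (plants : List Int) (capacity : Int) (out : Int) : Prop := out = wateringCans_alt plants capacity
instance (plants : List Int) (capacity : Int) (out : Int) : Decidable (Spec_wateringCans plants capacity out) := by unfold Spec_wateringCans; infer_instance

-- ===== CLAIM (what is proved, stated in full; the proofs are below) =====
def Claim_equal_wateringCans : Prop := ∀ (plants : List Int) (capacity : Int), Dom_wateringCans plants capacity → Spec_wateringCans plants capacity (wateringCans plants capacity)

-- ===== LEMMAS AND PROOFS =====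

-- B's two-pointer loop on indices [i, i+n) computes A's loop on the slice
-- (l.drop i).take n.
lemma loopB_eq_loopA (l : List Int) (cap : Int) :
    ∀ (n i : Nat), i + n ≤ l.length →
    ∀ (my fr : Int) (turn : Bool) (r : Int),
      wateringCansLoopB l cap (i : Int) ((i : Int) + (n : Int) - 1) my fr turn r
        = wateringCansLoopA cap ((l.drop i).take n) my fr turn r := by
  intro n
  induction n with
  | zero =>
    intro i _ my fr turn r
    rw [wateringCansLoopB]
    simp [wateringCansLoopA]
  | succ n ih =>
    intro i hle my fr turn r
    have hi : i < l.length := by omega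
    have hj : i + n < l.length := by omega
    have hslice : (l.drop i).take (n + 1) = l[i] :: (l.drop (i + 1)).take n := by
      rw [List.drop_eq_getElem_cons hi, List.take_succ_cons]
    rw [wateringCansLoopB]
    push_cast
    rw [show ((i : Int) + ((n : Int) + 1) - 1) = (i : Int) + (n : Int) from by ring,
      if_pos (show (i : Int) ≤ (i : Int) + (n : Int) from by omega)]
    cases turn with
    | true =>
      have hget : PySem.List.pyGetD l (i : Int) 0 = l[i] :=
        PySem.List.pyGetD_ofNat l i 0 hi
      have ihh := ih (i + 1) (by omega)
        ((if my ≤ l[i] then cap else my) - l[i]) (if my ≤ l[i] then cap else fr)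
        false (if my ≤ l[i] then r + 1 else r)
      push_cast at ihh
      rw [show ((i : Int) + 1 + (n : Int) - 1) = (i : Int) + (n : Int) from by ring] at ihh
      rw [hslice, wateringCansLoopA]
      simp only [if_true, hget, ihh]
    | false =>
      -- j = i + n; the last element of the slice is l[i + n]
      have hjget : PySem.List.pyGetD l ((i : Int) + (n : Int)) 0 = l[i + n] := by
        rw [show ((i : Int) + (n : Int)) = ((i + n : Nat) : Int) from by push_cast; ring]
        exact PySem.List.pyGetD_ofNat l (i + n) 0 hj
      have hlen : ((l.drop i).take (n + 1)).length = n + 1 := by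
        simp [List.length_take, List.length_drop]; omega
      have hne : (l.drop i).take (n + 1) ≠ [] := by
        intro h; rw [h] at hlen; simp at hlen
      have hlast : ((l.drop i).take (n + 1)).getLast hne = l[i + n] := by
        rw [List.getLast_eq_getElem]
        simp only [hlen]
        simp [List.getElem_take, List.getElem_drop]
      have hdl : ((l.drop i).take (n + 1)).dropLast = (l.drop i).take n := by
        rw [List.dropLast_eq_take, hlen]
        simp [List.take_take]
      obtain ⟨p, rest, h'⟩ := List.exists_cons_of_ne_nil hne
      have hlast? : ((l.drop i).take (n + 1)).getLast? = some l[i + n] := by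
        rw [List.getLast?_eq_some_getLast hne, hlast]
      have hlast' : (p :: rest).getLast (by simp) = l[i + n] := by
        rw [h'] at hlast?
        rw [List.getLast?_eq_some_getLast (by simp)] at hlast?
        exact Option.some.inj hlast?
      have hdl' : (p :: rest).dropLast = (l.drop i).take n := by rw [← h']; exact hdl
      have ihh := ih i (by omega)
        (if fr ≤ l[i + n] then cap else my)
        ((if fr ≤ l[i + n] then cap else fr) - l[i + n]) true
        (if fr ≤ l[i + n] then r + 1 else r)
      rw [h', wateringCansLoopA]
      simp only [Bool.false_eq_true, if_false, hjget, hlast', hdl', ihh]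

-- ===== VERDICT (by name: the statement is the Claim_ definition above) =====
theorem wateringCans_spec : Claim_equal_wateringCans := by
  intro plants capacity _
  unfold Spec_wateringCans wateringCans wateringCans_alt
  have h := loopB_eq_loopA plants capacity plants.length 0 (by omega) capacity capacity true 0
  simp only [Nat.cast_zero, zero_add, List.drop_zero, List.take_length] at h
  rw [h]
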